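-- pv_equiv track=rewrite | github.com/Torfab/adventOfCodeAndOtherEvents | OldAdventOfCode/2022/day23.py | calculateSpacesZones
-- ===== SOURCE A (Python) =====
-- def calculateSpacesZones(grid):
--   maxX=max(element[0] for element in grid)
--   minX=min(element[0] for element in grid)
--   maxY=max(element[1] for element in grid)
--   minY=min(element[1] for element in grid)
--   x=maxX-minX+1
--   y=maxY-minY+1
--
--   return (x*y)-len(grid)
-- ===== SOURCE B (Python) =====
-- def calculateSpacesZones(grid):
--     # Sort-then-pick: the bounding box corners are the endpoints of the
--     # sorted coordinate lists; no min/max scanning at all.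
--     byX = sorted(p[0] for p in grid)
--     byY = sorted(p[1] for p in grid)
--     return (byX[-1] - byX[0] + 1) * (byY[-1] - byY[0] + 1) - len(byX)
-- ===== Notes on version B (the rewrite author's own statement) =====
-- stated objective: alternative
-- what changed: Replaces the four min()/max() generator scans with sorting each coordinate list once and reading the bounds off the sorted lists' endpoints (sort-then-pick instead of extremum scans).
import Mathlib
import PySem

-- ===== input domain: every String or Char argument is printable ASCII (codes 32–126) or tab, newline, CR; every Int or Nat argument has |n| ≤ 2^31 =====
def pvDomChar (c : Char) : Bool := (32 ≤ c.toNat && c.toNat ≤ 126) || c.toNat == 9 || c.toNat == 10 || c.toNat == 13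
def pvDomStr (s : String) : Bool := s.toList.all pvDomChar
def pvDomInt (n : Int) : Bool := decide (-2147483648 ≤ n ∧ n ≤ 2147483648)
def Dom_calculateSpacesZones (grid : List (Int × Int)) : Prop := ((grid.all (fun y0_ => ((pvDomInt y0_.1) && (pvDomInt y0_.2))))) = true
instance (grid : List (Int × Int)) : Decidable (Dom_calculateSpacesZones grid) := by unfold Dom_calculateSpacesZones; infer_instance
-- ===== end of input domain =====

-- ===== PORT A =====
-- B sorts each coordinate list and reads the bounds off the endpoints instead of
-- scanning with min/max. Both programs raise on an empty grid (excluded by Pre_).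
def calculateSpacesZones (grid : List (Int × Int)) : Int :=
  match PySem.List.max? (grid.map Prod.fst) (fun v => v),
        PySem.List.min? (grid.map Prod.fst) (fun v => v),
        PySem.List.max? (grid.map Prod.snd) (fun v => v),
        PySem.List.min? (grid.map Prod.snd) (fun v => v) with
  | some maxX, some minX, some maxY, some minY =>
      ((maxX - minX + 1) * (maxY - minY + 1)) - (grid.length : Int)
  | _, _, _, _ => 0  -- unreachable under Pre_ (max() raises ValueError on an empty sequence)

-- ===== PORT B =====
def calculateSpacesZones_alt (grid : List (Int × Int)) : Int :=
  let byX := PySem.List.sorted (grid.map Prod.fst) (fun v => v) false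
  let byY := PySem.List.sorted (grid.map Prod.snd) (fun v => v) false
  -- nested option handling (each byX[i] is one indexing step; none = IndexError)
  match PySem.List.pyGet? byX (-1) with
  | none => 0  -- unreachable under Pre_ (byX[-1] raises IndexError on an empty list)
  | some mxX =>
    match PySem.List.pyGet? byX 0 with
    | none => 0
    | some mnX =>
      match PySem.List.pyGet? byY (-1) with
      | none => 0
      | some mxY =>
        match PySem.List.pyGet? byY 0 with
        | none => 0
        | some mnY => (mxX - mnX + 1) * (mxY - mnY + 1) - (byX.length : Int)

-- ===== PRECONDITION & SPEC =====
-- Pre_ excludes the empty grid, on which A raises ValueError (max() of an empty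
-- generator) and B raises IndexError (byX[-1] of an empty list).
def Pre_calculateSpacesZones (grid : List (Int × Int)) : Prop := grid ≠ []
instance (grid : List (Int × Int)) : Decidable (Pre_calculateSpacesZones grid) := by unfold Pre_calculateSpacesZones; infer_instance
def pvWitness_calculateSpacesZones : (List (Int × Int)) := [(0, 0)]
def Spec_calculateSpacesZones (grid : List (Int × Int)) (out : Int) : Prop := out = calculateSpacesZones_alt grid
instance (grid : List (Int × Int)) (out : Int) : Decidable (Spec_calculateSpacesZones grid out) := by unfold Spec_calculateSpacesZones; infer_instance

-- ===== CLAIM =====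
def Claim_equal_calculateSpacesZones : Prop := ∀ (grid : List (Int × Int)), Dom_calculateSpacesZones grid → Pre_calculateSpacesZones grid → Spec_calculateSpacesZones grid (calculateSpacesZones grid)

-- ===== LEMMAS AND PROOFS =====
-- In a ≤-pairwise list every element is ≤ the last element.
theorem pv_pairwise_le_getLast (s : List Int) (hp : s.Pairwise (· ≤ ·)) (hne : s ≠ []) :
    ∀ y ∈ s, y ≤ s.getLast hne := by
  induction s with
  | nil => simp
  | cons a t ih =>
      intro y hy
      rcases List.pairwise_cons.mp hp with ⟨ha, hpt⟩
      rcases List.mem_cons.mp hy with rfl | hyt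
      · cases t with
        | nil => simp [List.getLast]
        | cons b u =>
            have hlast : (b :: u).getLast (by simp) ∈ b :: u := List.getLast_mem _
            have := ha _ hlast
            simpa [List.getLast_cons] using this
      · cases t with
        | nil => cases hyt
        | cons b u =>
            have := ih hpt (by simp) y hyt
            simpa [List.getLast_cons] using this

-- head of sorted(l) is min(l)
theorem pv_sorted_head_eq_min (l : List Int) (hne : l ≠ []) :
    (PySem.List.sorted l (fun v => v) false).head? = PySem.List.min? l (fun v => v) := by
  have hperm := PySem.List.sorted_perm (xs := l) (key := fun v => v) (rev := false)
  have hsne : PySem.List.sorted l (fun v => v) false ≠ [] := by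
    intro h; exact hne ((h ▸ hperm).symm.eq_nil)
  obtain ⟨m, t, hs⟩ := List.exists_cons_of_ne_nil hsne
  obtain ⟨m0, hm0⟩ : ∃ m0, PySem.List.min? l (fun v => v) = some m0 := by
    cases h : PySem.List.min? l (fun v => v) with
    | none => exact absurd ((PySem.List.min?_eq_none_iff _ _).mp h) hne
    | some m0 => exact ⟨m0, rfl⟩
  have hmin_mem := PySem.List.min?_mem hm0
  have hmin_le := PySem.List.min?_isMin hm0
  have hm_le : ∀ y ∈ l, m ≤ y := PySem.List.key_head_sorted_le l (fun v => v) hs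
  have hm_mem : m ∈ l := by
    have : m ∈ PySem.List.sorted l (fun v => v) false := by simp [hs]
    exact (PySem.List.mem_sorted _ _ _ _).mp this
  have : m = m0 := le_antisymm (hm_le _ hmin_mem) (hmin_le _ hm_mem)
  simp [hs, hm0, this]

-- last of sorted(l) is max(l)
theorem pv_sorted_last_eq_max (l : List Int) (hne : l ≠ []) :
    (PySem.List.sorted l (fun v => v) false).getLast? = PySem.List.max? l (fun v => v) := by
  have hperm := PySem.List.sorted_perm (xs := l) (key := fun v => v) (rev := false)
  have hsne : PySem.List.sorted l (fun v => v) false ≠ [] := by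
    intro h; exact hne ((h ▸ hperm).symm.eq_nil)
  obtain ⟨m0, hm0⟩ : ∃ m0, PySem.List.max? l (fun v => v) = some m0 := by
    cases h : PySem.List.max? l (fun v => v) with
    | none => exact absurd ((PySem.List.max?_eq_none_iff _ _).mp h) hne
    | some m0 => exact ⟨m0, rfl⟩
  have hmax_mem := PySem.List.max?_mem hm0
  have hmax_ge := PySem.List.max?_isMax hm0
  have hp : (PySem.List.sorted l (fun v => v) false).Pairwise (· ≤ ·) := by
    simpa using PySem.List.sorted_pairwise (xs := l) (key := fun v => v)
  set s := PySem.List.sorted l (fun v => v) false with hsdef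
  have hlast_mem : s.getLast hsne ∈ l := (PySem.List.mem_sorted _ _ _ _).mp (List.getLast_mem hsne)
  have hge : ∀ y ∈ l, y ≤ s.getLast hsne := by
    intro y hy
    exact pv_pairwise_le_getLast s hp hsne y ((PySem.List.mem_sorted _ _ _ _).mpr hy)
  have : s.getLast hsne = m0 := le_antisymm (hmax_ge _ hlast_mem) (hge _ hmax_mem)
  rw [List.getLast?_eq_some_getLast hsne, this, hm0]

-- ===== VERDICT =====
theorem calculateSpacesZones_spec : Claim_equal_calculateSpacesZones := by
  intro grid _ hpre
  unfold Spec_calculateSpacesZones calculateSpacesZones calculateSpacesZones_alt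
  dsimp only
  have hx : grid.map Prod.fst ≠ [] := by simpa using hpre
  have hy : grid.map Prod.snd ≠ [] := by simpa using hpre
  have hlen : (PySem.List.sorted (grid.map Prod.fst) (fun v => v) false).length = grid.length := by
    simp [(PySem.List.sorted_perm (xs := grid.map Prod.fst) (key := fun v => v) (rev := false)).length_eq]
  rw [PySem.List.pyGet?_neg_one, PySem.List.pyGet?_neg_one,
      PySem.List.pyGet?_zero, PySem.List.pyGet?_zero,
      ← List.head?_eq_getElem?, ← List.head?_eq_getElem?,
      pv_sorted_last_eq_max _ hx, pv_sorted_head_eq_min _ hx,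
      pv_sorted_last_eq_max _ hy, pv_sorted_head_eq_min _ hy, hlen]
  cases PySem.List.max? (List.map Prod.fst grid) fun v => v <;>
    cases PySem.List.min? (List.map Prod.fst grid) fun v => v <;>
      cases PySem.List.max? (List.map Prod.snd grid) fun v => v <;>
        cases PySem.List.min? (List.map Prod.snd grid) fun v => v <;> rfl
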